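-- pv_equiv track=rewrite | github.com/rcsalomao/advent_of_code | 2024/dia07/main.py | build_equation
-- ===== SOURCE A (Python) =====
-- def build_equation(operands, operations):
--     equation = f"({operands[0]})"
--     for i in range(len(operations)):
--         if operations[i] in ["+", "*"]:
--             equation = f"(int{equation} {operations[i]} int({operands[i+1]}))"
--         else:
--             equation = f"(str{equation} + str({operands[i+1]}))"
--     equation = f"int{equation}"
--     return equation
-- ===== SOURCE B (Python) =====
-- def build_equation(operands, operations):
--     prefixes = []
--     middles = []
--     for i, op in enumerate(operations):
--         if op in ("+", "*"):
--             prefixes.append("(int")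
--             middles.append(f" {op} int({operands[i + 1]}))")
--         else:
--             prefixes.append("(str")
--             middles.append(f" + str({operands[i + 1]}))")
--     return "int" + "".join(reversed(prefixes)) + f"({operands[0]})" + "".join(middles)
-- ===== Notes on version B (the rewrite author's own statement) =====
-- stated objective: faster
-- what changed: Instead of rewrapping the whole accumulated equation string on every iteration, B collects per-operation prefix and suffix chunks in one pass and assembles the result with a single reversed-prefixes/base/middles concatenation.
import Mathlib
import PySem

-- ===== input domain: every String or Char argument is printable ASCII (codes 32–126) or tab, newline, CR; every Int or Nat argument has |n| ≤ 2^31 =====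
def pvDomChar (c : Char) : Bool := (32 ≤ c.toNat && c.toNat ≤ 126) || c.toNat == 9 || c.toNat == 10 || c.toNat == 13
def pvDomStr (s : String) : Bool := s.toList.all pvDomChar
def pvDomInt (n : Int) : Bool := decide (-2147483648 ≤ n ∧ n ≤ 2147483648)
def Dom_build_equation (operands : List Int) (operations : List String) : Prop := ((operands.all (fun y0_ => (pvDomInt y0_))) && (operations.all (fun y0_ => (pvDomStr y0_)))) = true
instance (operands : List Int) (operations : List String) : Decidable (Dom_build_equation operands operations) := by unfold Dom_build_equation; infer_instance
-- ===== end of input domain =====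

-- B avoids A's repeated rewrapping of the whole accumulator: it collects prefix/middle chunks in one pass and joins once.
-- ===== PORT A =====
-- A: equation = f"({operands[0]})"; each step rewraps the WHOLE equation string; finally "int" + equation.
def build_equation (operands : List Int) (operations : List String) : String :=
  let eq0 : List Char := "(".toList ++ PySem.Int.toChars (PySem.List.pyGetD operands 0 0) ++ ")".toList
  let eqn := (PySem.List.pyRange 0 (operations.length : Int) 1).foldl (fun eq i =>
    let op := PySem.List.pyGetD operations i ""
    if op == "+" || op == "*" then
      "(int".toList ++ eq ++ " ".toList ++ op.toList ++ " int(".toList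
        ++ PySem.Int.toChars (PySem.List.pyGetD operands (i + 1) 0) ++ "))".toList
    else
      "(str".toList ++ eq ++ " + str(".toList
        ++ PySem.Int.toChars (PySem.List.pyGetD operands (i + 1) 0) ++ "))".toList) eq0
  String.ofList ("int".toList ++ eqn)

-- ===== PORT B =====
-- B: one pass over enumerate(operations) appending to two chunk lists, then a single concatenation.
def build_equation_alt (operands : List Int) (operations : List String) : String :=
  let pm := (PySem.List.enumerate operations 0).foldl
    (fun (acc : List (List Char) × List (List Char)) io =>
      if io.2 == "+" || io.2 == "*" then
        (acc.1 ++ ["(int".toList],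
         acc.2 ++ [" ".toList ++ io.2.toList ++ " int(".toList
           ++ PySem.Int.toChars (PySem.List.pyGetD operands (io.1 + 1) 0) ++ "))".toList])
      else
        (acc.1 ++ ["(str".toList],
         acc.2 ++ [" + str(".toList
           ++ PySem.Int.toChars (PySem.List.pyGetD operands (io.1 + 1) 0) ++ "))".toList]))
    ([], [])
  String.ofList ("int".toList ++ pm.1.reverse.flatten
    ++ ("(".toList ++ PySem.Int.toChars (PySem.List.pyGetD operands 0 0) ++ ")".toList)
    ++ pm.2.flatten)

-- ===== PRECONDITION & SPEC =====
-- Pre_: Python A indexes operands[0] and operands[i+1] for each operation; it raises IndexError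
-- exactly when operands has at most len(operations) elements.
def Pre_build_equation (operands : List Int) (operations : List String) : Prop :=
  operations.length < operands.length
instance (operands : List Int) (operations : List String) : Decidable (Pre_build_equation operands operations) := by unfold Pre_build_equation; infer_instance
def pvWitness_build_equation : List Int × List String := ([1, 2], ["+"])

def Spec_build_equation (operands : List Int) (operations : List String) (out : String) : Prop := out = build_equation_alt operands operations
instance (operands : List Int) (operations : List String) (out : String) : Decidable (Spec_build_equation operands operations out) := by unfold Spec_build_equation; infer_instance

-- ===== CLAIM (what is proved, stated in full; the proofs are below) =====
def Claim_equal_build_equation : Prop := ∀ (operands : List Int) (operations : List String), Dom_build_equation operands operations → Pre_build_equation operands operations → Spec_build_equation operands operations (build_equation operands operations)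

-- ===== LEMMAS AND PROOFS =====

-- prefix chunk contributed by one (index, operation) pair
def pvPref (p : Int × String) : List Char :=
  if p.2 == "+" || p.2 == "*" then "(int".toList else "(str".toList

-- middle chunk contributed by one (index, operation) pair
def pvMid (operands : List Int) (p : Int × String) : List Char :=
  if p.2 == "+" || p.2 == "*" then
    " ".toList ++ p.2.toList ++ " int(".toList
      ++ PySem.Int.toChars (PySem.List.pyGetD operands (p.1 + 1) 0) ++ "))".toList
  else
    " + str(".toList ++ PySem.Int.toChars (PySem.List.pyGetD operands (p.1 + 1) 0) ++ "))".toList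

-- B's pair-fold is the pair of chunk maps
lemma pvAltFold (operands : List Int) :
    ∀ (l : List (Int × String)) (acc : List (List Char) × List (List Char)),
    l.foldl (fun (acc : List (List Char) × List (List Char)) io =>
      if io.2 == "+" || io.2 == "*" then
        (acc.1 ++ ["(int".toList],
         acc.2 ++ [" ".toList ++ io.2.toList ++ " int(".toList
           ++ PySem.Int.toChars (PySem.List.pyGetD operands (io.1 + 1) 0) ++ "))".toList])
      else
        (acc.1 ++ ["(str".toList],
         acc.2 ++ [" + str(".toList
           ++ PySem.Int.toChars (PySem.List.pyGetD operands (io.1 + 1) 0) ++ "))".toList])) acc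
    = (acc.1 ++ l.map pvPref, acc.2 ++ l.map (pvMid operands)) := by
  intro l
  induction l with
  | nil => intro acc; simp
  | cons p t ih =>
      intro acc
      simp only [List.foldl_cons, List.map_cons]
      by_cases h : (p.2 == "+" || p.2 == "*") = true
      · rw [if_pos h, ih]
        simp [pvPref, pvMid, h]
      · rw [if_neg h, ih]
        simp [pvPref, pvMid, h]

-- looking up an index inside the left part of an appended list
lemma pvGetD_append_left {α : Type} [Inhabited α] (l : List α) (x : α) (i : Int) (d : α)
    (h0 : 0 ≤ i) (h1 : i < l.length) :
    PySem.List.pyGetD (l ++ [x]) i d = PySem.List.pyGetD l i d := by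
  rw [PySem.List.pyGetD_eq_getElem (l ++ [x]) d h0 (by simp; omega),
      PySem.List.pyGetD_eq_getElem l d h0 (by omega)]
  rw [List.getElem_append_left (by omega)]

-- A's loop, characterised as B's single concatenation, by reverse induction on operations
lemma pvALoop (operands : List Int) (eq0 : List Char) :
    ∀ (ops : List String),
    (PySem.List.pyRange 0 (ops.length : Int) 1).foldl (fun eq i =>
      let op := PySem.List.pyGetD ops i ""
      if op == "+" || op == "*" then
        "(int".toList ++ eq ++ " ".toList ++ op.toList ++ " int(".toList
          ++ PySem.Int.toChars (PySem.List.pyGetD operands (i + 1) 0) ++ "))".toList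
      else
        "(str".toList ++ eq ++ " + str(".toList
          ++ PySem.Int.toChars (PySem.List.pyGetD operands (i + 1) 0) ++ "))".toList) eq0
    = ((PySem.List.enumerate ops 0).map pvPref).reverse.flatten ++ eq0
        ++ ((PySem.List.enumerate ops 0).map (pvMid operands)).flatten := by
  intro ops
  induction ops using List.reverseRecOn with
  | nil => simp [PySem.List.pyRange, PySem.List.enumerate]
  | append_singleton l op ih =>
      have hlen : ((l ++ [op]).length : Int) = (l.length : Int) + 1 := by
        simp
      rw [hlen, PySem.List.pyRange_one_append 0 (l.length : Int) ((l.length : Int) + 1)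
            (by omega) (by omega)]
      rw [List.foldl_append]
      have hone : PySem.List.pyRange (l.length : Int) ((l.length : Int) + 1) 1
          = [(l.length : Int)] := by
        rw [PySem.List.pyRange_one_cons (by omega)]
        simp [PySem.List.pyRange]
      rw [hone]
      have hcongr : (PySem.List.pyRange 0 (l.length : Int) 1).foldl (fun eq i =>
          let op' := PySem.List.pyGetD (l ++ [op]) i ""
          if op' == "+" || op' == "*" then
            "(int".toList ++ eq ++ " ".toList ++ op'.toList ++ " int(".toList
              ++ PySem.Int.toChars (PySem.List.pyGetD operands (i + 1) 0) ++ "))".toList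
          else
            "(str".toList ++ eq ++ " + str(".toList
              ++ PySem.Int.toChars (PySem.List.pyGetD operands (i + 1) 0) ++ "))".toList) eq0
        = (PySem.List.pyRange 0 (l.length : Int) 1).foldl (fun eq i =>
          let op' := PySem.List.pyGetD l i ""
          if op' == "+" || op' == "*" then
            "(int".toList ++ eq ++ " ".toList ++ op'.toList ++ " int(".toList
              ++ PySem.Int.toChars (PySem.List.pyGetD operands (i + 1) 0) ++ "))".toList
          else
            "(str".toList ++ eq ++ " + str(".toList
              ++ PySem.Int.toChars (PySem.List.pyGetD operands (i + 1) 0) ++ "))".toList) eq0 := by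
        apply PySem.List.foldl_congr_mem
        intro acc i hi
        have := PySem.List.mem_pyRange_one.mp hi
        rw [pvGetD_append_left l op i "" (by omega) (by omega)]
      rw [hcongr, ih]
      have hop : PySem.List.pyGetD (l ++ [op]) (l.length : Int) "" = op := by
        rw [PySem.List.pyGetD_eq_getElem _ _ (by omega) (by simp)]
        simp
      have henum : PySem.List.enumerate (l ++ [op]) 0
          = PySem.List.enumerate l 0 ++ [((l.length : Int), op)] := by
        rw [PySem.List.enumerate_append]
        simp [PySem.List.enumerate]
      rw [henum]
      simp only [List.foldl_cons, List.foldl_nil, hop, List.map_append, List.map_cons,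
        List.map_nil, List.reverse_append, List.reverse_cons, List.reverse_nil,
        List.flatten_append, List.flatten_cons, List.flatten_nil]
      by_cases h : (op == "+" || op == "*") = true
      · simp [h, pvPref, pvMid]
      · simp [h, pvPref, pvMid]

-- ===== VERDICT (by name: the statement is the Claim_ definition above) =====
theorem build_equation_spec : Claim_equal_build_equation := by
  intro operands operations _ _
  unfold Spec_build_equation build_equation build_equation_alt
  dsimp only
  rw [pvALoop operands _ operations, pvAltFold operands]
  simp
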